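-- pv_equiv track=rewrite | github.com/SnowyDreams/AoC | 201508/AoC_201508.py | rencode
-- ===== SOURCE A (Python) =====
-- escapes = ['\x22','\x5C']
--
-- def rencode(line):
--     rencoded = []
--     for char in line:
--         if char in escapes:
--             rencoded.append('\x5C')
--             rencoded.append(char)
--         else:
--             rencoded.append(char)
--     return("".join(rencoded).__len__())
-- ===== SOURCE B (Python) =====
-- def rencode(line):
--     return len(line) + line.count('\x22') + line.count('\x5C')
-- ===== Notes on version B (the rewrite author's own statement) =====
-- stated objective: simpler
-- what changed: B never builds the doubled character list: it returns a closed-form count (base length plus one library count-scan per escape character) instead of appending per-character and joining.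
import Mathlib
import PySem

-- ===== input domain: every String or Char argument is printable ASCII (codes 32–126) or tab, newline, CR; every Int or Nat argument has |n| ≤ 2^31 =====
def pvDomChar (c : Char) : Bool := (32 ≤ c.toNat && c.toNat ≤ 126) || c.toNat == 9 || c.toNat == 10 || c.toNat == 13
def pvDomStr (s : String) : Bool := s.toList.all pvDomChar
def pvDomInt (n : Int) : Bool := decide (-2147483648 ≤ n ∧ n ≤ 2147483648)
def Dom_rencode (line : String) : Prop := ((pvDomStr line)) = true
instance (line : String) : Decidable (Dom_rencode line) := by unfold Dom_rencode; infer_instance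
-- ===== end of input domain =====

-- B replaces A's per-character append loop + join by a closed-form count: len + count('"') + count('\'): simpler, no intermediate list.

-- ===== PORT A =====
-- Python's `escapes` list
def rencodeEscapes : List Char := ['\x22', '\x5C']

-- the loop: append '\' and the char for escapes, else the char; result list of chars
-- ("".join of one-char strings and __len__ = the char list's length, exact)
def rencode (line : String) : Int :=
  let rencoded : List Char :=
    line.toList.foldl
      (fun acc char =>
        if rencodeEscapes.contains char then (acc ++ ['\x5C']) ++ [char]
        else acc ++ [char])
      []
  (rencoded.length : Int)

-- ===== PORT B =====
def rencode_alt (line : String) : Int :=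
  (PySem.Str.len line : Int)
    + (PySem.Str.count line "\x22" : Int)
    + (PySem.Str.count line "\x5C" : Int)

-- ===== PRECONDITION & SPEC =====
def Spec_rencode (line : String) (out : Int) : Prop := out = rencode_alt line
instance (line : String) (out : Int) : Decidable (Spec_rencode line out) := by unfold Spec_rencode; infer_instance

-- ===== CLAIM (what is proved, stated in full; the proofs are below) =====
def Claim_equal_rencode : Prop := ∀ (line : String), Dom_rencode line → Spec_rencode line (rencode line)

-- ===== LEMMAS AND PROOFS =====

-- Chars.count.go with a single-character needle counts occurrences (non-overlap is vacuous for length-1)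
theorem rencode_count_go_singleton (c : Char) :
    ∀ (s : List Char) (fuel acc : Nat), s.length ≤ fuel →
      PySem.Chars.count.go [c] fuel s acc = acc + s.count c := by
  intro s
  induction s with
  | nil =>
      intro fuel acc _
      cases fuel <;> simp [PySem.Chars.count.go]
  | cons h t ih =>
      intro fuel acc hle
      cases fuel with
      | zero => simp at hle
      | succ n =>
          simp only [List.length_cons, Nat.succ_le_succ_iff] at hle
          by_cases hc : h = c
          · subst hc
            have hpre : [h].isPrefixOf (h :: t) = true := by simp [List.isPrefixOf]
            rw [PySem.Chars.count.go, if_pos hpre]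
            simp only [List.length_cons, List.length_nil, List.drop_succ_cons, List.drop_zero]
            rw [ih n (acc + 1) hle]
            simp
            omega
          · have hpre : [c].isPrefixOf (h :: t) = false := by
              simp only [List.isPrefixOf, Bool.and_eq_false_iff,
                beq_eq_false_iff_ne]
              exact Or.inl (fun e => hc e.symm)
            rw [PySem.Chars.count.go]
            simp only [hpre, Bool.false_eq_true, if_false]
            rw [ih n acc hle]
            have : List.count c (h :: t) = List.count c t := by
              simp [hc]
            rw [this]

theorem rencode_count_singleton (c : Char) (s : List Char) :
    PySem.Chars.count s [c] = s.count c := by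
  simp [PySem.Chars.count, rencode_count_go_singleton c s s.length 0 le_rfl]

-- the length of A's accumulated list, with a general accumulator
theorem rencode_foldl_length (l : List Char) :
    ∀ (acc : List Char),
      (l.foldl
        (fun acc char =>
          if rencodeEscapes.contains char then (acc ++ ['\x5C']) ++ [char]
          else acc ++ [char]) acc).length
      = acc.length + l.length + l.count '\x22' + l.count '\x5C' := by
  induction l with
  | nil => intro acc; simp
  | cons h t ih =>
      intro acc
      rw [List.foldl_cons]
      by_cases hmem : rencodeEscapes.contains h = true
      · rw [if_pos hmem, ih]
        have hor : h = '\x22' ∨ h = '\x5C' := by simpa [rencodeEscapes] using hmem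
        rcases hor with h1 | h1 <;> subst h1 <;> simp <;> omega
      · rw [if_neg hmem, ih]
        have hq : h ≠ '\x22' := by rintro rfl; simp [rencodeEscapes] at hmem
        have hb : h ≠ '\x5C' := by rintro rfl; simp [rencodeEscapes] at hmem
        simp only [List.length_append, List.length_cons, List.length_nil,
          List.count_cons, beq_iff_eq, if_neg hq, if_neg hb]
        omega

-- ===== VERDICT (by name: the statement is the Claim_ definition above) =====
theorem rencode_spec : Claim_equal_rencode := by
  intro line _
  unfold Spec_rencode rencode rencode_alt
  show ((line.toList.foldl
      (fun acc char =>
        if rencodeEscapes.contains char then (acc ++ ['\x5C']) ++ [char]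
        else acc ++ [char]) []).length : Int) = _
  rw [rencode_foldl_length line.toList []]
  simp only [PySem.Str.count_eq, PySem.Str.len_eq]
  rw [show ("\x22" : String).toList = ['\x22'] from rfl,
      show ("\x5C" : String).toList = ['\x5C'] from rfl,
      rencode_count_singleton, rencode_count_singleton]
  push_cast
  simp
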